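-- pv_equiv track=rewrite | github.com/mofoinfa/XinKe_python | 兼职测试/猫眼爬取/__init__.py | data_exchange
-- ===== SOURCE A (Python) =====
-- def data_exchange(num,font_list):
--     count = ''
--     num_list = num.strip().split(';')
--     for num in num_list:
--         if num:
--             for data in font_list[1:]:
--                 if num.startswith('.'):
--                     key = 'uni' + num[1:].upper()
--                     if key in data:
--                         count = count+'.'+data.get(key)
--                 else:
--                     key = 'uni' + num.upper()
--                     if key in data:
--                         count = count+data.get(key)
--     return count+'万'
-- ===== SOURCE B (Python) =====
-- def data_exchange(num, font_list):
--     # Build one index: key -> values contributed by each font dict (in data order),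
--     # then decode with a single lookup per token.
--     index = {}
--     for data in font_list[1:]:
--         for key, value in data.items():
--             index.setdefault(key, []).append(value)
--     parts = []
--     for token in num.strip().split(';'):
--         if token:
--             if token.startswith('.'):
--                 key = 'uni' + token[1:].upper()
--                 parts.append(''.join('.' + v for v in index.get(key, [])))
--             else:
--                 key = 'uni' + token.upper()
--                 parts.append(''.join(index.get(key, [])))
--     return ''.join(parts) + '万'
-- ===== Notes on version B (the rewrite author's own statement) =====
-- stated objective: simpler
-- what changed: B makes one pass over font_list[1:] building a key->list-of-values index, then decodes each token with a single dict lookup and joins the parts, instead of A's per-token rescan of every font dict with string-accumulator concatenation.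
import Mathlib
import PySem

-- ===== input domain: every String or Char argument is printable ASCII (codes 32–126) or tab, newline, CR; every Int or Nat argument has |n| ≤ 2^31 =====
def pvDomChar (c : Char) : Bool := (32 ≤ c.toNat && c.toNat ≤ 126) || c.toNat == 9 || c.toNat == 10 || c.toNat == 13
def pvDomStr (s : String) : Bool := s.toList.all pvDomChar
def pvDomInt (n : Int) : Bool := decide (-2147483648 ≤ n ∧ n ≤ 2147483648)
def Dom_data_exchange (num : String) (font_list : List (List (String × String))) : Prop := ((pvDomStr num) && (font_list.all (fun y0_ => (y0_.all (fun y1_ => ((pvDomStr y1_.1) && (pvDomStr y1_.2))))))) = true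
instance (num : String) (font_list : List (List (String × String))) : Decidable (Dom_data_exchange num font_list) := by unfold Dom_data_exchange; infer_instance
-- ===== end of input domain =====

-- B replaces A's per-token rescan of every font dict by a prebuilt key->values index and a
-- single lookup per token (objective: simpler/alternative; no speed claim).

-- ===== PORT A =====
def data_exchange (num : String) (font_list : List (List (String × String))) : String :=
  -- num.strip().split(';'): the separator ";" is nonempty, so split? is always `some`
  let num_list := (PySem.Str.split? (PySem.Str.strip num) ";").getD []
  let count := num_list.foldl (fun count n =>
    if n ≠ "" then
      (PySem.List.slice font_list (some 1) none).foldl (fun count data =>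
        if PySem.Str.startswith n "." then
          let key := "uni" ++ PySem.Str.upper (PySem.Str.slice n (some 1) none)
          match (PySem.Dict.mk data).get? key with   -- 'if key in data: count+'.'+data.get(key)'
          | some v => count ++ "." ++ v
          | none => count
        else
          let key := "uni" ++ PySem.Str.upper n
          match (PySem.Dict.mk data).get? key with   -- 'if key in data: count+data.get(key)'
          | some v => count ++ v
          | none => count) count
    else count) ""
  count ++ "万"

-- ===== PORT B =====
def data_exchange_alt (num : String) (font_list : List (List (String × String))) : String :=
  let index := (PySem.List.slice font_list (some 1) none).foldl
      (fun idx data => data.foldl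
        (fun idx p => idx.modify p.1 [] (· ++ [p.2]))   -- index.setdefault(key, []).append(value)
        idx)
      (PySem.Dict.empty : PySem.Dict String (List String))
  let parts := ((PySem.Str.split? (PySem.Str.strip num) ";").getD []).foldl
      (fun parts token =>
        if token ≠ "" then
          if PySem.Str.startswith token "." then
            let key := "uni" ++ PySem.Str.upper (PySem.Str.slice token (some 1) none)
            parts ++ [PySem.Str.join "" ((index.getD key []).map (fun v => "." ++ v))]
          else
            let key := "uni" ++ PySem.Str.upper token
            parts ++ [PySem.Str.join "" (index.getD key [])]
        else parts) []
  PySem.Str.join "" parts ++ "万"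

-- ===== PRECONDITION & SPEC =====
-- Pre_ excludes only association lists whose tail entries repeat a key: those do not represent
-- Python dicts (dict keys are unique), so no Python-level input is excluded.
def Pre_data_exchange (num : String) (font_list : List (List (String × String))) : Prop :=
  ∀ d ∈ font_list.drop 1, (d.map Prod.fst).Nodup
instance (num : String) (font_list : List (List (String × String))) : Decidable (Pre_data_exchange num font_list) := by unfold Pre_data_exchange; infer_instance
def pvWitness_data_exchange : String × (List (List (String × String))) :=
  ("2;.3", [[("uniA", "9")], [("uni2", "1"), ("uni3", "4")]])

def Spec_data_exchange (num : String) (font_list : List (List (String × String))) (out : String) : Prop := out = data_exchange_alt num font_list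
instance (num : String) (font_list : List (List (String × String))) (out : String) : Decidable (Spec_data_exchange num font_list out) := by unfold Spec_data_exchange; infer_instance

-- ===== CLAIM (what is proved, stated in full; the proofs are below) =====
def Claim_equal_data_exchange : Prop := ∀ (num : String) (font_list : List (List (String × String))), Dom_data_exchange num font_list → Pre_data_exchange num font_list → Spec_data_exchange num font_list (data_exchange num font_list)

-- ===== LEMMAS AND PROOFS =====

-- first-match values that the tail dicts contribute for a key
def pvVals (k : String) (ds : List (List (String × String))) : List String :=
  ds.flatMap (fun d => ((PySem.Dict.mk d).get? k).toList)

-- ''.join distributes over cons / append when the separator is empty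
theorem pv_join_cons (s : String) (rest : List String) :
    PySem.Str.join "" (s :: rest) = s ++ PySem.Str.join "" rest := by
  rw [← String.toList_inj]
  cases rest with
  | nil => simp [PySem.Str.toList_join, PySem.Chars.join, List.intercalate]
  | cons b l =>
      simp [PySem.Str.toList_join, PySem.Chars.join_cons_cons]

theorem pv_filter_eq_get? (k : String) (d : List (String × String))
    (h : (d.map Prod.fst).Nodup) :
    (d.filter (fun p => p.1 == k)).map (·.2) = ((PySem.Dict.mk d).get? k).toList := by
  induction d with
  | nil => simp; rfl
  | cons p tl ih =>
      simp only [List.map_cons, List.nodup_cons] at h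
      rw [List.filter_cons, PySem.Dict.get?_mk_cons]
      by_cases hk : p.1 = k
      · subst hk
        have htl : tl.filter (fun q => q.1 == p.1) = [] := by
          rw [List.filter_eq_nil_iff]
          intro q hq hbq
          exact h.1 (List.mem_map.mpr ⟨q, hq, eq_of_beq hbq⟩)
        simp [htl]
      · simp only [show (p.1 == k) = false from beq_eq_false_iff_ne.mpr hk]
        simpa using ih h.2

theorem pv_index_getD (k : String) (ds : List (List (String × String)))
    (idx : PySem.Dict String (List String)) :
    (ds.foldl (fun i d => d.foldl (fun i p => i.modify p.1 [] (· ++ [p.2])) i) idx).getD k []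
      = idx.getD k [] ++ ds.flatMap (fun d => (d.filter (fun p => p.1 == k)).map (·.2)) := by
  induction ds generalizing idx with
  | nil => simp
  | cons d tl ih =>
      rw [List.foldl_cons, ih, PySem.Dict.getD_foldl_modify_append, List.flatMap_cons,
        List.append_assoc]

-- A's inner loop over the tail dicts, '.'-prefixed branch
theorem pv_innerA_dot (k : String) (ds : List (List (String × String))) (c : String) :
    ds.foldl (fun count data =>
        match (PySem.Dict.mk data).get? k with
        | some v => count ++ "." ++ v
        | none => count) c
      = c ++ PySem.Str.join "" ((ds.flatMap (fun d => ((PySem.Dict.mk d).get? k).toList)).map (fun v => "." ++ v)) := by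
  induction ds generalizing c with
  | nil =>
      rw [← String.toList_inj]
      simp [PySem.Str.toList_join, PySem.Chars.join, List.intercalate]
  | cons d tl ih =>
      rw [List.foldl_cons, List.flatMap_cons]
      cases hg : (PySem.Dict.mk d).get? k with
      | none => rw [ih]; simp
      | some v =>
          rw [ih]
          simp only [Option.toList_some, List.singleton_append, List.map_cons]
          rw [pv_join_cons]
          simp [String.append_assoc]

-- A's inner loop over the tail dicts, plain branch
theorem pv_innerA_plain (k : String) (ds : List (List (String × String))) (c : String) :
    ds.foldl (fun count data =>
        match (PySem.Dict.mk data).get? k with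
        | some v => count ++ v
        | none => count) c
      = c ++ PySem.Str.join "" (ds.flatMap (fun d => ((PySem.Dict.mk d).get? k).toList)) := by
  induction ds generalizing c with
  | nil =>
      rw [← String.toList_inj]
      simp [PySem.Str.toList_join, PySem.Chars.join, List.intercalate]
  | cons d tl ih =>
      rw [List.foldl_cons, List.flatMap_cons]
      cases hg : (PySem.Dict.mk d).get? k with
      | none => rw [ih]; simp
      | some v =>
          rw [ih]
          simp only [Option.toList_some, List.singleton_append]
          rw [pv_join_cons]
          simp [String.append_assoc]

-- per-token contribution, as B computes it
def pvContrib (tail : List (List (String × String))) (t : String) : String :=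
  if PySem.Str.startswith t "." then
    PySem.Str.join "" ((pvVals ("uni" ++ PySem.Str.upper (PySem.Str.slice t (some 1) none)) tail).map (fun v => "." ++ v))
  else
    PySem.Str.join "" (pvVals ("uni" ++ PySem.Str.upper t) tail)

-- A's outer loop equals the join of the per-token contributions of nonempty tokens
theorem pv_outerA (tail : List (List (String × String))) (tokens : List String) (c : String) :
    tokens.foldl (fun count n =>
      if n ≠ "" then
        tail.foldl (fun count data =>
          if PySem.Str.startswith n "." then
            match (PySem.Dict.mk data).get? ("uni" ++ PySem.Str.upper (PySem.Str.slice n (some 1) none)) with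
            | some v => count ++ "." ++ v
            | none => count
          else
            match (PySem.Dict.mk data).get? ("uni" ++ PySem.Str.upper n) with
            | some v => count ++ v
            | none => count) count
      else count) c
    = c ++ PySem.Str.join "" ((tokens.filter (fun t => !(t == ""))).map (pvContrib tail)) := by
  induction tokens generalizing c with
  | nil =>
      rw [← String.toList_inj]
      simp [PySem.Str.toList_join, PySem.Chars.join, List.intercalate]
  | cons t tl ih =>
      rw [List.foldl_cons]
      by_cases ht : t = ""
      · rw [if_neg (by simp [ht]), ih,
          show List.filter (fun t => !(t == "")) (t :: tl) = List.filter (fun t => !(t == "")) tl from by simp [ht]]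
      · rw [if_pos ht,
          show List.filter (fun t => !(t == "")) (t :: tl) = t :: List.filter (fun t => !(t == "")) tl from by simp [ht]]
        by_cases hd : PySem.Str.startswith t "." = true
        · simp only [hd, if_true]
          rw [pv_innerA_dot, ih, List.map_cons, pv_join_cons, String.append_assoc]
          unfold pvContrib pvVals
          rw [if_pos hd]
        · simp only [hd, if_false, Bool.false_eq_true]
          rw [pv_innerA_plain, ih, List.map_cons, pv_join_cons, String.append_assoc]
          unfold pvContrib pvVals
          rw [if_neg hd]

-- ===== VERDICT (by name: the statement is the Claim_ definition above) =====
theorem data_exchange_spec : Claim_equal_data_exchange := by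
  intro num font_list _hDom hPre
  unfold Spec_data_exchange
  simp only [data_exchange, data_exchange_alt]
  set tail := PySem.List.slice font_list (some 1) none with htail
  have htl : tail = font_list.drop 1 := by
    rw [htail, PySem.List.slice_from font_list (by norm_num)]; rfl
  have hidx : ∀ k, ((tail.foldl (fun idx data => data.foldl (fun idx p => idx.modify p.1 [] (· ++ [p.2])) idx)
        (PySem.Dict.empty : PySem.Dict String (List String))).getD k []) = pvVals k tail := by
    intro k
    rw [pv_index_getD]
    have : tail.flatMap (fun d => (d.filter (fun p => p.1 == k)).map (·.2)) = pvVals k tail := by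
      unfold pvVals
      apply List.flatMap_congr
      intro d hd
      exact pv_filter_eq_get? k d (hPre d (htl ▸ hd))
    rw [this, show ((PySem.Dict.empty : PySem.Dict String (List String)).getD k []) = [] from rfl,
      List.nil_append]
  rw [pv_outerA tail]
  -- B side: the loop appends exactly pvContrib for each nonempty token
  have hB : ∀ (tokens : List String) (parts : List String),
      tokens.foldl (fun parts token =>
        if token ≠ "" then
          if PySem.Str.startswith token "." then
            parts ++ [PySem.Str.join "" (((tail.foldl (fun idx data => data.foldl (fun idx p => idx.modify p.1 [] (· ++ [p.2])) idx)
                (PySem.Dict.empty : PySem.Dict String (List String))).getD ("uni" ++ PySem.Str.upper (PySem.Str.slice token (some 1) none)) []).map (fun v => "." ++ v))]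
          else
            parts ++ [PySem.Str.join "" ((tail.foldl (fun idx data => data.foldl (fun idx p => idx.modify p.1 [] (· ++ [p.2])) idx)
                (PySem.Dict.empty : PySem.Dict String (List String))).getD ("uni" ++ PySem.Str.upper token) [])]
        else parts) parts
      = parts ++ (tokens.filter (fun t => !(t == ""))).map (pvContrib tail) := by
    intro tokens
    induction tokens with
    | nil => simp
    | cons t tl ih =>
        intro parts
        rw [List.foldl_cons]
        by_cases ht : t = ""
        · rw [if_neg (by simp [ht]), ih,
            show List.filter (fun t => !(t == "")) (t :: tl) = List.filter (fun t => !(t == "")) tl from by simp [ht]]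
        · rw [if_pos ht,
            show List.filter (fun t => !(t == "")) (t :: tl) = t :: List.filter (fun t => !(t == "")) tl from by simp [ht],
            List.map_cons, List.append_cons]
          by_cases hd : PySem.Str.startswith t "." = true
          · rw [if_pos hd, ih, hidx]
            unfold pvContrib
            rw [if_pos hd]
            simp [List.append_assoc]
          · rw [if_neg hd, ih, hidx]
            unfold pvContrib
            rw [if_neg hd]
            simp [List.append_assoc]
  rw [hB]
  simp
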